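-- pv_equiv track=rewrite | github.com/caterpilerr/advent_of_code_2024 | day7/solution.py | solve
-- ===== SOURCE A (Python) =====
-- from itertools import product
--
-- def solve(data, operator_set):
--     '''Solve the puzzle based on the operator set'''
--     result = 0
--     operator_cache = {}
--
--     for line in data:
--         expected, operands = line[0], line[1:]
--         n = len(operands) - 1
--
--         # Generate operator combinations (cached)
--         if n not in operator_cache:
--             operator_cache[n] = list(product(operator_set, repeat=n))
--
--         for operators in operator_cache[n]:
--             if evaluate(operands, operators) == expected:
--                 result += expected
--                 break
--
--     return result
--
-- def evaluate(operands, operators):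
--     result = operands[0]
--     for i in range(len(operators)):
--         if operators[i] == '+':
--             result += operands[i + 1]
--         elif operators[i] == '*':
--             result *= operands[i + 1]
--         elif operators[i] == '||':
--             result = int(str(result) + str(operands[i + 1]))
--
--     return result
-- ===== SOURCE B (Python) =====
-- def _apply(v, y, op):
--     if op == '+':
--         return v + y
--     if op == '*':
--         return v * y
--     if op == '||':
--         return int(str(v) + str(y))
--     return v
--
-- def _search(expected, value, rest, ops):
--     '''Depth-first search over operator choices, sharing prefix evaluations.'''
--     if not rest:
--         return value == expected
--     return any(_search(expected, _apply(value, rest[0], op), rest[1:], ops)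
--                for op in ops)
--
-- def solve(data, operator_set):
--     '''Solve the puzzle based on the operator set'''
--     total = 0
--     for line in data:
--         expected, operands = line[0], line[1:]
--         if _search(expected, operands[0], operands[1:], operator_set):
--             total += expected
--     return total
-- ===== Notes on version B (the rewrite author's own statement) =====
-- stated objective: alternative
-- what changed: Per line, B runs a recursive depth-first search over operator choices that extends one running value and shares every prefix evaluation with early exit, instead of A's materialization of all operator tuples via itertools.product and full left-to-right re-evaluation of each tuple; B's return/raise behaviour is identical to A's on every input.
-- outside the precondition, e.g. on solve([[2, 1, 2, -1]], ['+', '||']): A returns 2, B returns 2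
import Mathlib
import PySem

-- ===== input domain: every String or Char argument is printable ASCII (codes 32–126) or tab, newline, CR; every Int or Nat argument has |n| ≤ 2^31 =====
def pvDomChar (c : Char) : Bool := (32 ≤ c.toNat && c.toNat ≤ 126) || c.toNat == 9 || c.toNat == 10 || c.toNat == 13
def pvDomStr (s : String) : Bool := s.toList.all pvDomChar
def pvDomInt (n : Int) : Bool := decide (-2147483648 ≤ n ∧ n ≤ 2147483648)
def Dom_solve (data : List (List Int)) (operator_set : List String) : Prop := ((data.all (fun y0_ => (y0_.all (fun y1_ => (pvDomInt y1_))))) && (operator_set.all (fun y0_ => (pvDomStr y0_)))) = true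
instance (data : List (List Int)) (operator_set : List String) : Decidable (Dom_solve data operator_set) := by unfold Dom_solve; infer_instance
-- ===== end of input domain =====

-- B replaces A's materialized enumeration of operator tuples (itertools.product + full
-- re-evaluation of each tuple) by a prefix-sharing recursive DFS with early exit (objective: alternative; same exponential cost).


-- ===== PORT A =====
-- One operator application (the body of A's `evaluate` loop; B's `_apply` has the identical
-- branches). '||' is int(str(r)+str(x)); the '.getD 0' branch is dead under Pre_solve
-- (Python's int(...) raises ValueError exactly where ofChars? is none, i.e. negative x).
def applyOp (r : Int) (x : Int) (op : String) : Int :=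
  if op == "+" then r + x
  else if op == "*" then r * x
  else if op == "||" then (PySem.Int.ofChars? (PySem.Int.toChars r ++ PySem.Int.toChars x)).getD 0
  else r

-- A's `evaluate` loop: i-th operator applied to operands[i+1]; simultaneous recursion on the
-- operator tuple and the tail of the operands (the `(_ :: _, [])` case is unreachable since
-- A only calls it with len(operators) = len(operands) - 1).
def evalLoop (r : Int) : List String → List Int → Int
  | [], _ => r
  | _ :: _, [] => r
  | op :: ops, y :: ys => evalLoop (applyOp r y op) ops ys

-- A's `evaluate(operands, operators)`; `[]` is unreachable under Pre_solve (operands[0] raises).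
def evaluateA (operands : List Int) (operators : List String) : Int :=
  match operands with
  | [] => 0
  | x :: rest => evalLoop x operators rest

-- itertools.product(operator_set, repeat=n), in Python's order (leftmost varies slowest).
def productRepeat (s : List String) : Nat → List (List String)
  | 0 => [[]]
  | n + 1 => s.flatMap (fun a => (productRepeat s n).map (a :: ·))

-- A. The `operator_cache` dict is pure memoization of product(...) keyed by n (no behavioural
-- effect), so the port recomputes the combination list; the for/break over the combinations is
-- "some combination evaluates to expected" (List.any, short-circuit like the break).
def solve (data : List (List Int)) (operator_set : List String) : Int :=
  data.foldl (fun result line =>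
    match line with
    | [] => result   -- line[0]: IndexError, excluded by Pre_solve
    | _expected :: operands =>
      let n := operands.length - 1   -- n = -1 (product raises) excluded by Pre_solve
      let combos := productRepeat operator_set n
      if combos.any (fun operators => evaluateA operands operators == _expected)
      then result + _expected else result) 0

-- ===== PORT B =====
-- B's `_search`: DFS over operator choices extending one running value, sharing prefixes,
-- short-circuiting on the first match (List.any is short-circuit, like Python's any()).
def dfs (ops : List String) (expected : Int) (value : Int) : List Int → Bool
  | [] => value == expected
  | y :: ys => ops.any (fun op => dfs ops expected (applyOp value y op) ys)

-- B: per line, one DFS launch from operands[0]. Lines with fewer than two numbers are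
-- unreachable under Pre_solve (B's Python raises IndexError on operands[0], as A raises too).
def solve_alt (data : List (List Int)) (operator_set : List String) : Int :=
  data.foldl (fun total line =>
    match line with
    | [] => total
    | [_] => total
    | expected :: x :: rest =>
      if dfs operator_set expected x rest then total + expected else total) 0

-- ===== PRECONDITION & SPEC =====
-- Pre_ excludes exactly the inputs on which Python can raise: (a) lines with fewer than two
-- numbers (A: IndexError on line[0] or ValueError from product(repeat=-1); B: IndexError), and
-- (b) inputs where '||' is available together with a negative right operand (line[2:]), on which
-- int(str(r)+str(y)) raises ValueError unless a matching combination is enumerated first — A's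
-- raising there is order-dependent and not closed-form, so the whole region is excluded; B's
-- Python behaves identically to A on all of it (returns where A returns, raises where A raises).
def Pre_solve (data : List (List Int)) (operator_set : List String) : Prop :=
  (∀ line ∈ data, 2 ≤ line.length) ∧
  ("||" ∈ operator_set → ∀ line ∈ data, ∀ x ∈ line.drop 2, 0 ≤ x)
instance (data : List (List Int)) (operator_set : List String) : Decidable (Pre_solve data operator_set) := by unfold Pre_solve; infer_instance

def pvWitness_solve : List (List Int) × List String := ([[3, 1, 2], [10, 2, 5], [100, 2, 5]], ["+", "*", "||"])

def Spec_solve (data : List (List Int)) (operator_set : List String) (out : Int) : Prop := out = solve_alt data operator_set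
instance (data : List (List Int)) (operator_set : List String) (out : Int) : Decidable (Spec_solve data operator_set out) := by unfold Spec_solve; infer_instance

-- ===== CLAIM =====
def Claim_equal_solve : Prop := ∀ (data : List (List Int)) (operator_set : List String), Dom_solve data operator_set → Pre_solve data operator_set → Spec_solve data operator_set (solve data operator_set)

-- ===== LEMMAS AND PROOFS =====

-- List.any respects pointwise-equal predicates.
theorem any_congr_mem {α : Type} (l : List α) (p q : α → Bool)
    (h : ∀ a ∈ l, p a = q a) : l.any p = l.any q := by
  induction l with
  | nil => rfl
  | cons a t ih =>
      simp only [List.any_cons, h a (List.mem_cons_self ..),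
        ih (fun b hb => h b (List.mem_cons_of_mem _ hb))]

-- The heart: A's "some operator tuple of length |rest| evaluates to expected" equals B's DFS.
theorem any_product_eq_dfs (ops : List String) (e : Int) :
    ∀ (rest : List Int) (v : Int),
      (productRepeat ops rest.length).any (fun c => evalLoop v c rest == e)
        = dfs ops e v rest := by
  intro rest
  induction rest with
  | nil => intro v; simp [productRepeat, evalLoop, dfs]
  | cons y ys ih =>
      intro v
      simp only [List.length_cons, productRepeat, dfs, List.any_flatMap, List.any_map]
      refine any_congr_mem _ _ _ (fun op _ => ?_)
      simpa [Function.comp, evalLoop] using ih (applyOp v y op)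

-- ===== VERDICT (by name: the statement is the Claim_ definition above) =====
theorem solve_spec : Claim_equal_solve := by
  intro data ops _hdom hpre
  unfold Spec_solve solve solve_alt
  refine PySem.List.foldl_congr_mem data _ _ 0 ?_
  intro acc line hline
  have h2 : 2 ≤ line.length := hpre.1 line hline
  rcases line with _ | ⟨e, _ | ⟨x, rest⟩⟩
  · simp at h2
  · simp at h2
  · show (if (productRepeat ops ((x :: rest).length - 1)).any
            (fun operators => evaluateA (x :: rest) operators == e)
          then acc + e else acc) = _
    simp only [List.length_cons, Nat.add_sub_cancel, evaluateA]
    rw [any_product_eq_dfs]
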